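-- pv_equiv track=rewrite | github.com/zakaria2122/SAE_serpiuto | source/IA.py | recherche_mini
-- ===== SOURCE A (Python) =====
-- def recherche_mini(dico_radar):
--     """recherche de minimum dans un dictionnaire
--
--     Args:
--         dico_radar (dict): dictionnaire identique à celui renvoyé par la fonction objet voisinage
--
--     Returns:
--         str: cardinalité idéal
--     """
--     #complexité 0(N²)
--     mini = None
--     card = ""
--     for cardi, lst_tuple in dico_radar.items():
--         for dist,_, _ in lst_tuple:
--             if mini is None or dist < mini :
--                 mini = dist
--                 card = cardi
--     return card
-- ===== SOURCE B (Python) =====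
-- def recherche_mini(dico_radar):
--     # Build a per-key table of minimum distances, then take the key with the
--     # smallest table value (min returns the first minimal element, preserving
--     # A's first-occurrence tie-break).
--     table = [(cardi, min(d for d, _, _ in lst))
--              for cardi, lst in dico_radar.items() if lst]
--     if not table:
--         return ""
--     return min(table, key=lambda kv: kv[1])[0]
-- ===== Notes on version B (the rewrite author's own statement) =====
-- stated objective: alternative
-- what changed: Replaces the flat stateful scan over all (key, distance) pairs by a two-phase computation: first build a table of per-key minimum distances (skipping empty lists), then reduce that table with min(..., key=...) whose first-minimal rule reproduces the strict-< first-key tie-break.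
import Mathlib
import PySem

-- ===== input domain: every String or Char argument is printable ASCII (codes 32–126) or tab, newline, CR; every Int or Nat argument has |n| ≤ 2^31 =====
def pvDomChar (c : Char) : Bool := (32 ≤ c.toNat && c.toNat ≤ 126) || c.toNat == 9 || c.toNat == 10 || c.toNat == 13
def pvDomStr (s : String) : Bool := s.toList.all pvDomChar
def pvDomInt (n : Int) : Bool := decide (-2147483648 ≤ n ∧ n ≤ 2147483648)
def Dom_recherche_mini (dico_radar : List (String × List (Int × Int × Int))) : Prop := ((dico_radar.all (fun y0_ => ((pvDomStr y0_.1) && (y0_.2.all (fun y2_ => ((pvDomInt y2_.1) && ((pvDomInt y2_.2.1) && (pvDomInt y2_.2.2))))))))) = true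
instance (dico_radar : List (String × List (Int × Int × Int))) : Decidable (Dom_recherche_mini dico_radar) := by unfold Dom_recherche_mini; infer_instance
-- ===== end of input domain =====

-- B replaces A's single flat stateful scan with a per-key minimum table followed
-- by a first-minimal reduction over that table (alternative decomposition, same cost).

-- ===== PORT A =====
-- inner update: "if mini is None or dist < mini: mini = dist; card = cardi"
def pvStepA (cardi : String) (st : Option Int × String) (t : Int × Int × Int) :
    Option Int × String :=
  match st.1 with
  | none => (some t.1, cardi)
  | some m => if t.1 < m then (some t.1, cardi) else st

def recherche_mini (dico_radar : List (String × List (Int × Int × Int))) : String :=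
  (dico_radar.foldl (fun st kv => kv.2.foldl (pvStepA kv.1) st)
    ((none : Option Int), "")).2

-- ===== PORT B =====
-- min(d for d,_,_ in lst) on a nonempty list t :: ts
def pvMinFst (t : Int × Int × Int) (ts : List (Int × Int × Int)) : Int :=
  ts.foldl (fun a x => min a x.1) t.1

-- the table comprehension: skip empty lists, store per-key minimum
def pvTable (dico_radar : List (String × List (Int × Int × Int))) :
    List (String × Int) :=
  dico_radar.filterMap (fun kv =>
    match kv.2 with
    | [] => none
    | t :: ts => some (kv.1, pvMinFst t ts))

-- min(table, key=lambda kv: kv[1]) : first element with minimal second component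
def pvSel (best q : String × Int) : String × Int :=
  if q.2 < best.2 then q else best

def recherche_mini_alt (dico_radar : List (String × List (Int × Int × Int))) : String :=
  match pvTable dico_radar with
  | [] => ""
  | p :: ps => (ps.foldl pvSel p).1

-- ===== PRECONDITION & SPEC =====
def Spec_recherche_mini (dico_radar : List (String × List (Int × Int × Int))) (out : String) : Prop := out = recherche_mini_alt dico_radar
instance (dico_radar : List (String × List (Int × Int × Int))) (out : String) : Decidable (Spec_recherche_mini dico_radar out) := by unfold Spec_recherche_mini; infer_instance

-- ===== CLAIM (what is proved, stated in full; the proofs are below) =====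
def Claim_equal_recherche_mini : Prop := ∀ (dico_radar : List (String × List (Int × Int × Int))), Dom_recherche_mini dico_radar → Spec_recherche_mini dico_radar (recherche_mini dico_radar)

-- ===== LEMMAS AND PROOFS =====

lemma foldl_min_le_init (ts : List (Int × Int × Int)) (a : Int) :
    ts.foldl (fun a x => min a x.1) a ≤ a := by
  induction ts generalizing a with
  | nil => simp [List.foldl]
  | cons t ts ih =>
      simp only [List.foldl]
      exact le_trans (ih _) (min_le_left _ _)

lemma foldl_min_min (ts : List (Int × Int × Int)) (m a : Int) :
    ts.foldl (fun a x => min a x.1) (min m a) = min m (ts.foldl (fun a x => min a x.1) a) := by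
  induction ts generalizing a with
  | nil => simp [List.foldl]
  | cons t ts ih =>
      simp only [List.foldl]
      rw [min_assoc, ih]

-- inner fold of A from a some-state computes the running minimum, tagging c iff it improved
lemma innerA_some (c : String) (lst : List (Int × Int × Int)) (m : Int) (card : String) :
    lst.foldl (pvStepA c) (some m, card)
      = (some (lst.foldl (fun a x => min a x.1) m),
         if lst.foldl (fun a x => min a x.1) m < m then c else card) := by
  induction lst generalizing m card with
  | nil => simp [List.foldl]
  | cons t ts ih =>
      simp only [List.foldl, pvStepA]
      by_cases h : t.1 < m
      · have hmin : min m t.1 = t.1 := min_eq_right (le_of_lt h)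
        have hlt : ts.foldl (fun a x => min a x.1) t.1 < m :=
          lt_of_le_of_lt (foldl_min_le_init ts t.1) h
        simp [if_pos h, ih, hmin, hlt]
      · have hmin : min m t.1 = m := min_eq_left (le_of_not_gt h)
        simp [if_neg h, ih, hmin]

-- the effect of one nonempty list on a some-state is exactly one pvSel comparison
lemma innerA_some_sel (c : String) (t : Int × Int × Int) (ts : List (Int × Int × Int))
    (m : Int) (card : String) :
    (t :: ts).foldl (pvStepA c) (some m, card)
      = (if pvMinFst t ts < m then (some (pvMinFst t ts), c) else (some m, card)) := by
  rw [innerA_some]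
  have hfold : (t :: ts).foldl (fun a x => min a x.1) m = min m (pvMinFst t ts) := by
    simp only [List.foldl]
    exact foldl_min_min ts m t.1
  by_cases h : pvMinFst t ts < m
  · have h1 : min m (pvMinFst t ts) = pvMinFst t ts := min_eq_right (le_of_lt h)
    simp [hfold, h1, h]
  · have h1 : min m (pvMinFst t ts) = m := min_eq_left (le_of_not_gt h)
    simp [hfold, h1]
    exact fun hlt => absurd hlt h

-- outer fold of A from a some-state equals B's selection fold over the table
lemma outerA_some (d : List (String × List (Int × Int × Int))) (m : Int) (card : String) :
    d.foldl (fun st kv => kv.2.foldl (pvStepA kv.1) st) (some m, card)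
      = (let r := (pvTable d).foldl pvSel (card, m); (some r.2, r.1)) := by
  induction d generalizing m card with
  | nil => simp [pvTable]
  | cons kv d ih =>
      obtain ⟨c, lst⟩ := kv
      cases lst with
      | nil => simpa [pvTable, List.filterMap] using ih m card
      | cons t ts =>
          simp only [List.foldl_cons]
          rw [show List.foldl (pvStepA c) (pvStepA c (some m, card) t) ts
                = (t :: ts).foldl (pvStepA c) (some m, card) from rfl, innerA_some_sel]
          by_cases h : pvMinFst t ts < m
          · rw [if_pos h, ih]
            simp [pvTable, List.filterMap, pvSel, h, List.foldl_cons]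
          · rw [if_neg h, ih]
            simp [pvTable, List.filterMap, pvSel, h, List.foldl_cons]

-- the first nonempty list installs its minimum, tagged with its key
lemma innerA_none (c : String) (t : Int × Int × Int) (ts : List (Int × Int × Int))
    (card : String) :
    (t :: ts).foldl (pvStepA c) ((none : Option Int), card) = (some (pvMinFst t ts), c) := by
  simp only [List.foldl_cons, pvStepA]
  rw [innerA_some]
  simp [pvMinFst]

-- A from the initial state equals B's match-and-fold over the table
lemma outerA_none (d : List (String × List (Int × Int × Int))) (card : String) :
    d.foldl (fun st kv => kv.2.foldl (pvStepA kv.1) st) (none, card)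
      = (match pvTable d with
         | [] => ((none : Option Int), card)
         | p :: ps => (let r := ps.foldl pvSel p; (some r.2, r.1))) := by
  induction d generalizing card with
  | nil => simp [pvTable]
  | cons kv d ih =>
      obtain ⟨c, lst⟩ := kv
      cases lst with
      | nil => simpa [pvTable, List.filterMap] using ih card
      | cons t ts =>
          simp only [List.foldl_cons]
          rw [show List.foldl (pvStepA c) (pvStepA c ((none : Option Int), card) t) ts
                = (t :: ts).foldl (pvStepA c) ((none : Option Int), card) from rfl,
              innerA_none, outerA_some]
          simp [pvTable, List.filterMap]

-- ===== VERDICT (by name: the statement is the Claim_ definition above) =====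
theorem recherche_mini_spec : Claim_equal_recherche_mini := by
  intro d _
  unfold Spec_recherche_mini recherche_mini recherche_mini_alt
  rw [outerA_none]
  cases h : pvTable d with
  | nil => simp
  | cons p ps => simp
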